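-- pv_equiv track=rewrite | github.com/TaegyuHan/Puzzlie_algorithm_with_python | 20171483_한태규_Puzzlie10/prac_4.py | Good
-- ===== SOURCE A (Python) =====
-- def Good(Comb: list, candList: list, candTalents: list, AllTalents: list):
--     """선택된 참가자의 프로그램에 모든 재능이
--        방송 되는지 확인한다.
--
--     Args:
--         Comb (set): [선택 참가자]
--         candList (list): [모든 참가자]
--         candTalents (list): [참가자 각각의 재능]
--         AllTalents (list): [참가자의 모든 재능]
--
--     Returns:
--         [bool]: [모든 재능을 포함했는지 확인합니다.]
--     """
--
--     for tal in AllTalents:  # 모든 재능 검사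
--         cover = False
--         for cand in Comb:  # 선택 참가자 1명씩 검사
--             candTal = candTalents[candList.index(cand)]
--             if tal in candTal:  # 있으면 통과
--                 cover = True
--         if not cover:  # 없으면  False
--             return False
--
--     return True  # 있으면  True
-- ===== SOURCE B (Python) =====
-- def Good(Comb: list, candList: list, candTalents: list, AllTalents: list):
--     idx = {}
--     for i, cand in enumerate(candList):
--         idx.setdefault(cand, i)
--     covered = set()
--     for cand in Comb:
--         covered.update(candTalents[idx[cand]])
--     return set(AllTalents) <= covered
-- ===== Notes on version B (the rewrite author's own statement) =====
-- stated objective: faster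
-- what changed: Instead of re-scanning candList with .index and re-testing membership for every (talent, participant) pair, B builds the first-occurrence index dict once, unions the selected participants' talents into one set, and answers with a single subset test.
-- outside the precondition, e.g. on Good(['x'], [], [], []): A returns True, B raises KeyError
import Mathlib
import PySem

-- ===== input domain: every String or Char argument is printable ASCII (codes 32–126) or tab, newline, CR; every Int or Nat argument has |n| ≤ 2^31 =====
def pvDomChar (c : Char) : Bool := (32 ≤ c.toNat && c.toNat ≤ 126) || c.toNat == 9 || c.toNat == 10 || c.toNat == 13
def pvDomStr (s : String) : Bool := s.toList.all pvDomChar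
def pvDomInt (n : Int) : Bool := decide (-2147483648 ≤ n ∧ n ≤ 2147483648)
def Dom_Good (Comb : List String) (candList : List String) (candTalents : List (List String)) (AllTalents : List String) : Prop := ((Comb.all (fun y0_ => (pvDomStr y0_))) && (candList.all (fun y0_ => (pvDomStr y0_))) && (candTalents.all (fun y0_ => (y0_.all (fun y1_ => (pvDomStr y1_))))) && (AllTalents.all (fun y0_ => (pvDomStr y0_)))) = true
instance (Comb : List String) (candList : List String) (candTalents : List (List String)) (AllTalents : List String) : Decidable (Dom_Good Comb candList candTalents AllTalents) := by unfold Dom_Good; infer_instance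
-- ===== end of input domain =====

-- B replaces A's per-(talent, participant) rescan of candList (.index) by a one-pass first-occurrence
-- index dict plus a union set of covered talents and a single subset test (objective: faster).


-- ===== PORT A =====
-- inner 'for cand in Comb' loop of A: none = the ValueError/IndexError of candTalents[candList.index(cand)]
def goodCover (candList : List String) (candTalents : List (List String)) (tal : String) (Comb : List String) : Option Bool :=
  Comb.foldl (fun acc cand =>
    match acc with
    | none => none
    | some cover =>
      match PySem.List.index? candList cand with
      | none => none
      | some i =>
        match candTalents[i]? with
        | none => none
        | some candTal => some (cover || candTal.contains tal)) (some false)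

-- outer 'for tal in AllTalents' loop of A
def goodLoop (Comb : List String) (candList : List String) (candTalents : List (List String)) : List String → Option Bool
  | [] => some true
  | tal :: rest =>
    match goodCover candList candTalents tal Comb with
    | none => none
    | some cover => if cover then goodLoop Comb candList candTalents rest else some false

def Good (Comb : List String) (candList : List String) (candTalents : List (List String)) (AllTalents : List String) : Bool :=
  (goodLoop Comb candList candTalents AllTalents).getD false

-- ===== PORT B =====
-- idx = {}; for i, cand in enumerate(candList): idx.setdefault(cand, i)
def altIdx (candList : List String) : PySem.Dict String Int :=
  (PySem.List.enumerate candList 0).foldl (fun d p => d.setdefault p.2 p.1) PySem.Dict.empty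

-- covered = set(); for cand in Comb: covered.update(candTalents[idx[cand]])  (none = KeyError/IndexError)
def altCovered (candList : List String) (candTalents : List (List String)) (Comb : List String) : Option (PySem.Set String) :=
  Comb.foldl (fun acc cand =>
    match acc with
    | none => none
    | some s =>
      match (altIdx candList).get? cand with
      | none => none
      | some i =>
        match PySem.List.pyGet? candTalents i with
        | none => none
        | some tl => some (PySem.Set.update s tl)) (some PySem.Set.empty)

def Good_alt (Comb : List String) (candList : List String) (candTalents : List (List String)) (AllTalents : List String) : Bool :=
  match altCovered candList candTalents Comb with
  | none => false
  | some covered => PySem.Set.issubset (PySem.Set.ofList AllTalents) covered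

-- ===== PRECONDITION & SPEC =====
-- Pre_ excludes every Comb containing a participant without a usable talents row: A raises there
-- (ValueError/IndexError) whenever AllTalents is nonempty, and B always raises there (KeyError/IndexError);
-- the only excluded inputs where A still returns (True) are those with AllTalents = [], an accident of
-- A's loop never running — B's natural lookup raises there, so they are excluded rather than matched.
def Pre_Good (Comb : List String) (candList : List String) (candTalents : List (List String)) (AllTalents : List String) : Prop :=
  ∀ cand ∈ Comb, ∃ i, PySem.List.index? candList cand = some i ∧ i < candTalents.length
instance (Comb : List String) (candList : List String) (candTalents : List (List String)) (AllTalents : List String) : Decidable (Pre_Good Comb candList candTalents AllTalents) := by unfold Pre_Good; infer_instance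

def pvWitness_Good : List String × List String × List (List String) × List String :=
  (["ann", "bob"], ["ann", "bob", "cid"], [["sing"], ["dance"], ["magic"]], ["sing", "dance"])

def Spec_Good (Comb : List String) (candList : List String) (candTalents : List (List String)) (AllTalents : List String) (out : Bool) : Prop := out = Good_alt Comb candList candTalents AllTalents
instance (Comb : List String) (candList : List String) (candTalents : List (List String)) (AllTalents : List String) (out : Bool) : Decidable (Spec_Good Comb candList candTalents AllTalents out) := by unfold Spec_Good; infer_instance

-- ===== CLAIM (what is proved, stated in full; the proofs are below) =====
def Claim_equal_Good : Prop := ∀ (Comb : List String) (candList : List String) (candTalents : List (List String)) (AllTalents : List String), Dom_Good Comb candList candTalents AllTalents → Pre_Good Comb candList candTalents AllTalents → Spec_Good Comb candList candTalents AllTalents (Good Comb candList candTalents AllTalents)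

-- ===== LEMMAS AND PROOFS =====

-- the talents row of a participant, as both programs look it up
def talsOf (candList : List String) (candTalents : List (List String)) (cand : String) : List String :=
  match PySem.List.index? candList cand with
  | none => []
  | some i => candTalents.getD i []

theorem talsOf_eq {candList : List String} {candTalents : List (List String)} {cand : String}
    {i : Nat} (hi : PySem.List.index? candList cand = some i) (hlt : i < candTalents.length) :
    talsOf candList candTalents cand = candTalents[i] := by
  unfold talsOf
  rw [hi]
  simp [List.getD, List.getElem?_eq_getElem hlt]

theorem altIdx_go (xs : List String) (s : Int) (d : PySem.Dict String Int) (c : String) :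
    (((PySem.List.enumerate xs s).foldl (fun d p => d.setdefault p.2 p.1) d).get? c)
      = (d.get? c).or ((PySem.List.index? xs c).map (fun (n : Nat) => s + (n : Int))) := by
  induction xs generalizing s d with
  | nil => simp [PySem.List.enumerate_nil, PySem.List.index?_eq_idxOf?, List.idxOf?]
  | cons x xs ih =>
    rw [PySem.List.enumerate_cons]
    simp only [List.foldl_cons]
    rw [ih]
    by_cases hc : c = x
    · subst hc
      rw [PySem.List.index?_cons_self]
      rw [PySem.Dict.get?_setdefault_self]
      cases d.get? c <;> simp
    · rw [PySem.List.index?_cons_of_ne xs (Ne.symm hc)]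
      rw [PySem.Dict.get?_setdefault_of_ne d s hc]
      cases d.get? c with
      | some v => simp
      | none =>
        cases PySem.List.index? xs c with
        | none => simp
        | some n =>
          simp only [Option.map_some, Option.none_or, Option.some.injEq]
          push_cast
          ring

theorem altIdx_get? (candList : List String) (c : String) :
    (altIdx candList).get? c = (PySem.List.index? candList c).map (fun (n : Nat) => (n : Int)) := by
  unfold altIdx
  rw [altIdx_go]
  simp [PySem.Dict.get?_empty]

theorem goodCover_eq (candList : List String) (candTalents : List (List String)) (tal : String)
    (Comb : List String) (b : Bool)
    (hp : ∀ cand ∈ Comb, ∃ i, PySem.List.index? candList cand = some i ∧ i < candTalents.length) :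
    Comb.foldl (fun acc cand =>
      match acc with
      | none => none
      | some cover =>
        match PySem.List.index? candList cand with
        | none => none
        | some i =>
          match candTalents[i]? with
          | none => none
          | some candTal => some (cover || candTal.contains tal)) (some b)
      = some (b || Comb.any (fun cand => (talsOf candList candTalents cand).contains tal)) := by
  induction Comb generalizing b with
  | nil => simp
  | cons cand rest ih =>
    obtain ⟨i, hi, hlt⟩ := hp cand (by simp)
    simp only [List.foldl_cons, hi]
    rw [List.getElem?_eq_getElem hlt]
    rw [ih _ (fun c hc => hp c (by simp [hc]))]
    rw [List.any_cons, talsOf_eq hi hlt, Bool.or_assoc]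

theorem goodLoop_eq (Comb : List String) (candList : List String) (candTalents : List (List String))
    (AllTalents : List String)
    (hp : ∀ cand ∈ Comb, ∃ i, PySem.List.index? candList cand = some i ∧ i < candTalents.length) :
    goodLoop Comb candList candTalents AllTalents
      = some (AllTalents.all (fun tal => Comb.any
          (fun cand => (talsOf candList candTalents cand).contains tal))) := by
  induction AllTalents with
  | nil => simp [goodLoop]
  | cons tal rest ih =>
    unfold goodLoop
    rw [show goodCover candList candTalents tal Comb
        = some (Comb.any (fun cand => (talsOf candList candTalents cand).contains tal)) from
      by unfold goodCover; rw [goodCover_eq candList candTalents tal Comb false hp]; simp]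
    rw [List.all_cons]
    cases ha : Comb.any (fun cand => (talsOf candList candTalents cand).contains tal) with
    | false => simp only [Bool.false_and]; rfl
    | true => simp only [Bool.true_and]; exact ih

theorem altCovered_eq (candList : List String) (candTalents : List (List String))
    (Comb : List String)
    (hp : ∀ cand ∈ Comb, ∃ i, PySem.List.index? candList cand = some i ∧ i < candTalents.length) :
    ∃ S, altCovered candList candTalents Comb = some S ∧
      ∀ t, t ∈ S ↔ ∃ cand ∈ Comb, t ∈ talsOf candList candTalents cand := by
  unfold altCovered
  suffices h : ∀ (Comb : List String) (s : PySem.Set String),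
      (∀ cand ∈ Comb, ∃ i, PySem.List.index? candList cand = some i ∧ i < candTalents.length) →
      ∃ S, Comb.foldl (fun acc cand =>
        match acc with
        | none => none
        | some s =>
          match (altIdx candList).get? cand with
          | none => none
          | some i =>
            match PySem.List.pyGet? candTalents i with
            | none => none
            | some tl => some (PySem.Set.update s tl)) (some s) = some S ∧
        ∀ t, t ∈ S ↔ t ∈ s ∨ ∃ cand ∈ Comb, t ∈ talsOf candList candTalents cand by
    obtain ⟨S, hS, hmem⟩ := h Comb PySem.Set.empty hp
    exact ⟨S, hS, fun t => by rw [hmem t]; simp [PySem.Set.empty]⟩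
  intro Comb₀ s hp₀
  induction Comb₀ generalizing s with
  | nil => exact ⟨s, rfl, by simp⟩
  | cons cand rest ih =>
    obtain ⟨i, hi, hlt⟩ := hp₀ cand (by simp)
    have hstep : (match (altIdx candList).get? cand with
        | none => none
        | some i =>
          match PySem.List.pyGet? candTalents i with
          | none => none
          | some tl => some (PySem.Set.update s tl))
        = some (PySem.Set.update s candTalents[i]) := by
      rw [altIdx_get?, hi]
      simp only [Option.map_some]
      rw [PySem.List.pyGet?_natCast, List.getElem?_eq_getElem hlt]
    simp only [List.foldl_cons]
    rw [hstep]
    obtain ⟨S, hS, hmem⟩ := ih (PySem.Set.update s candTalents[i]) (fun c hc => hp₀ c (by simp [hc]))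
    refine ⟨S, hS, fun t => ?_⟩
    rw [hmem t, PySem.Set.mem_update]
    constructor
    · rintro ((h | h) | ⟨c, hc, ht⟩)
      · exact Or.inl h
      · exact Or.inr ⟨cand, by simp, by rw [talsOf_eq hi hlt]; exact h⟩
      · exact Or.inr ⟨c, by simp [hc], ht⟩
    · rintro (h | ⟨c, hc, ht⟩)
      · exact Or.inl (Or.inl h)
      · rcases List.mem_cons.mp hc with rfl | hc'
        · exact Or.inl (Or.inr (by rwa [talsOf_eq hi hlt] at ht))
        · exact Or.inr ⟨c, hc', ht⟩

-- ===== VERDICT (by name: the statement is the Claim_ definition above) =====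
theorem Good_spec : Claim_equal_Good := by
  intro Comb candList candTalents AllTalents _ hp
  unfold Spec_Good Good Good_alt
  rw [goodLoop_eq Comb candList candTalents AllTalents hp]
  obtain ⟨S, hS, hmem⟩ := altCovered_eq candList candTalents Comb hp
  rw [hS]
  simp only [Option.getD_some]
  rw [Bool.eq_iff_iff, List.all_eq_true, PySem.Set.issubset_iff]
  constructor
  · intro h t ht
    rw [PySem.Set.mem_ofList] at ht
    rw [hmem t]
    have := h t ht
    rw [List.any_eq_true] at this
    obtain ⟨c, hc, htc⟩ := this
    exact ⟨c, hc, by simpa using htc⟩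
  · intro h t ht
    have := h t (by rw [PySem.Set.mem_ofList]; exact ht)
    rw [hmem t] at this
    obtain ⟨c, hc, htc⟩ := this
    rw [List.any_eq_true]
    exact ⟨c, hc, by simpa using htc⟩
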